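-- pv_equiv track=rewrite | github.com/bdcdo/traduJA_public | streamlit_app/translator.py | seleciona_contexto
-- ===== SOURCE A (Python) =====
-- def seleciona_contexto(texto, i, linhas, tipo="anteriores"):
--     """
--     Seleciona linhas de contexto (anteriores ou posteriores) para auxiliar na tradução.
--     """
--     def get_non_empty_lines(start, end, lines):
--         return [l for l in lines[start:end] if l.strip()]
--
--     if tipo == "anteriores":
--         # Seleciona linhas anteriores (já traduzidas)
--         if i == 0:
--             return ""
--         else:
--             # Pegar até 3 linhas não vazias anteriores
--             context_lines = []
--             count = 0
--             pos = i - 1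
--             while pos >= 0 and count < 3:
--                 if linhas[pos].strip():
--                     context_lines.insert(0, linhas[pos])
--                     count += 1
--                 pos -= 1
--
--             if not context_lines:
--                 return ""
--             return 'Aqui estão as linhas imediatamente anteriores a essa, já traduzidas:\n' + "\n".join(context_lines)
--     else:
--         # Seleciona linhas posteriores (ainda não traduzidas)
--         if i >= len(linhas) - 1:
--             return ""
--         else:
--             # Pegar até 3 linhas não vazias posteriores
--             context_lines = []
--             count = 0
--             pos = i + 1
--             while pos < len(linhas) and count < 3:
--                 if linhas[pos].strip():
--                     context_lines.append(linhas[pos])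
--                     count += 1
--                 pos += 1
--
--             if not context_lines:
--                 return ""
--             return 'Aqui estão as linhas imediatamente posteriores a essa, ainda não traduzidas:\n' + "\n".join(context_lines)
-- ===== SOURCE B (Python) =====
-- def seleciona_contexto(texto, i, linhas, tipo="anteriores"):
--     """
--     Seleciona linhas de contexto (anteriores ou posteriores) para auxiliar na tradução.
--     """
--     if tipo == "anteriores":
--         if i <= 0:
--             return ""
--         before = [l for l in linhas[:i] if l.strip()][-3:]
--         if not before:
--             return ""
--         return 'Aqui estão as linhas imediatamente anteriores a essa, já traduzidas:\n' + "\n".join(before)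
--     else:
--         if i >= len(linhas) - 1:
--             return ""
--         after = [l for l in linhas[i+1:] if l.strip()][:3]
--         if not after:
--             return ""
--         return 'Aqui estão as linhas imediatamente posteriores a essa, ainda não traduzidas:\n' + "\n".join(after)
-- ===== Notes on version B (the rewrite author's own statement) =====
-- stated objective: simpler
-- what changed: Replaces each branch's index/counter while-loop (with insert(0) on the backward scan) by a slice-filter-slice pipeline: before=[l for l in linhas[:i] if l.strip()][-3:] resp. after=[l for l in linhas[i+1:] if l.strip()][:3].
-- intended difference: For tipo!='anteriores' with a wrapped negative index -len(linhas)-1 <= i <= -2 (and fewer than 3 non-empty lines in linhas[i+1:] but at least one non-empty line overall), A's scan wraps around via Python's negative indexing and then re-reads lines from the start (possibly duplicating them), while B takes context only from the actual tail slice linhas[i+1:]; B's is the intended 'following lines' value. — e.g. on seleciona_contexto("", -2, ["a", "b"], "posteriores"): A returns "Aqui estão as linhas imediatamente posteriores a essa, ainda não traduzidas:\nb\na\nb", B returns "Aqui estão as linhas imediatamente posteriores a essa, ainda não traduzidas:\nb"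
import Mathlib
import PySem

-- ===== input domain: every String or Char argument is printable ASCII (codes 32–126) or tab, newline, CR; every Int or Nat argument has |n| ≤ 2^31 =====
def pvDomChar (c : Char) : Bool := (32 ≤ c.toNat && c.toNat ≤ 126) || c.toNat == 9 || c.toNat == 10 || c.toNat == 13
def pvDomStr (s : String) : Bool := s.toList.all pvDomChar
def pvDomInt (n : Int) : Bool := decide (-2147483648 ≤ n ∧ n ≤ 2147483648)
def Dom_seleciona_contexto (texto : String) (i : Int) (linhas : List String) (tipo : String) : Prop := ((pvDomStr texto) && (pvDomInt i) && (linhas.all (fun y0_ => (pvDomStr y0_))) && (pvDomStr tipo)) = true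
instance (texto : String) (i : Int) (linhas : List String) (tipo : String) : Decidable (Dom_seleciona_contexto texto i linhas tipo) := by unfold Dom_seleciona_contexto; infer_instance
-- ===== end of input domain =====

-- B replaces A's index/counter while-loops by a slice-filter-slice pipeline (objective: simpler);
-- on wrapped negative indices i ≤ -2 in the 'posteriores' branch B returns the intended tail context (see D_).

-- shared line test: Python's 'if l.strip()'
def pvNE (l : String) : Bool := !(PySem.Str.strip l == "")

-- ===== PORT A =====
-- the backward while-loop of the 'anteriores' branch (context_lines.insert(0, l) is cons on acc);
-- pyGet? = none is where the Python raises IndexError (outside Pre_)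
def pvPrevLoop (linhas : List String) (pos : Int) (count : Nat) (acc : List String) : List String :=
  if 0 ≤ pos ∧ count < 3 then
    match PySem.List.pyGet? linhas pos with
    | none => acc
    | some l =>
      if pvNE l then pvPrevLoop linhas (pos - 1) (count + 1) (l :: acc)
      else pvPrevLoop linhas (pos - 1) count acc
  else acc
termination_by (pos + 1).toNat
decreasing_by all_goals omega

-- the forward while-loop of the 'posteriores' branch
def pvNextLoop (linhas : List String) (pos : Int) (count : Nat) (acc : List String) : List String :=
  if pos < PySem.List.len linhas ∧ count < 3 then
    match PySem.List.pyGet? linhas pos with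
    | none => acc
    | some l =>
      if pvNE l then pvNextLoop linhas (pos + 1) (count + 1) (acc ++ [l])
      else pvNextLoop linhas (pos + 1) count acc
  else acc
termination_by (PySem.List.len linhas - pos).toNat
decreasing_by all_goals simp [PySem.List.len] at *; omega

def seleciona_contexto (texto : String) (i : Int) (linhas : List String) (tipo : String) : String :=
  if tipo == "anteriores" then
    if i == 0 then ""
    else
      let context_lines := pvPrevLoop linhas (i - 1) 0 []
      if context_lines = [] then ""
      else "Aqui estão as linhas imediatamente anteriores a essa, já traduzidas:\n" ++ PySem.Str.join "\n" context_lines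
  else
    if i ≥ PySem.List.len linhas - 1 then ""
    else
      let context_lines := pvNextLoop linhas (i + 1) 0 []
      if context_lines = [] then ""
      else "Aqui estão as linhas imediatamente posteriores a essa, ainda não traduzidas:\n" ++ PySem.Str.join "\n" context_lines

-- ===== PORT B =====
def seleciona_contexto_alt (texto : String) (i : Int) (linhas : List String) (tipo : String) : String :=
  if tipo == "anteriores" then
    if i ≤ 0 then ""
    else
      let before := PySem.List.slice ((PySem.List.slice linhas none (some i)).filter pvNE) (some (-3)) none
      if before = [] then ""
      else "Aqui estão as linhas imediatamente anteriores a essa, já traduzidas:\n" ++ PySem.Str.join "\n" before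
  else
    if i ≥ PySem.List.len linhas - 1 then ""
    else
      let after := PySem.List.slice ((PySem.List.slice linhas (some (i + 1)) none).filter pvNE) none (some 3)
      if after = [] then ""
      else "Aqui estão as linhas imediatamente posteriores a essa, ainda não traduzidas:\n" ++ PySem.Str.join "\n" after

-- ===== PRECONDITION & SPEC =====
-- A raises IndexError when tipo == "anteriores" and i > len(linhas), and when tipo ≠ "anteriores" and i < -len(linhas) - 1
def Pre_seleciona_contexto (texto : String) (i : Int) (linhas : List String) (tipo : String) : Prop :=
  if tipo = "anteriores" then i ≤ (linhas.length : Int) else -(linhas.length : Int) - 1 ≤ i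
instance (texto : String) (i : Int) (linhas : List String) (tipo : String) : Decidable (Pre_seleciona_contexto texto i linhas tipo) := by unfold Pre_seleciona_contexto; infer_instance

def pvWitness_seleciona_contexto : String × Int × List String × String := ("", 1, ["a", "b"], "anteriores")

-- For tipo ≠ "anteriores" with -len(linhas)-1 ≤ i ≤ -2 (and fewer than 3 non-empty lines in linhas[i+1:] but at least
-- one non-empty line overall), A's scan wraps around via Python's negative indexing and re-reads lines from the start
-- (possibly duplicating them), while B takes context only from the actual tail linhas[i+1:]; B's is the intended value.
def D_seleciona_contexto (texto : String) (i : Int) (linhas : List String) (tipo : String) : Prop :=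
  tipo ≠ "anteriores" ∧ -(linhas.length : Int) - 1 ≤ i ∧ i ≤ -2 ∧
  ((linhas.drop ((linhas.length : Int) + (i + 1)).toNat).filter pvNE).length < 3 ∧
  1 ≤ (linhas.filter pvNE).length
instance (texto : String) (i : Int) (linhas : List String) (tipo : String) : Decidable (D_seleciona_contexto texto i linhas tipo) := by unfold D_seleciona_contexto; infer_instance

def Spec_seleciona_contexto (texto : String) (i : Int) (linhas : List String) (tipo : String) (out : String) : Prop := ¬ D_seleciona_contexto texto i linhas tipo → out = seleciona_contexto_alt texto i linhas tipo
instance (texto : String) (i : Int) (linhas : List String) (tipo : String) (out : String) : Decidable (Spec_seleciona_contexto texto i linhas tipo out) := by unfold Spec_seleciona_contexto; infer_instance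

def pvDiffWitness_seleciona_contexto : String × Int × List String × String := ("", -2, ["a", "b"], "posteriores")
def pvDiffWitnessOut_seleciona_contexto : String × String :=
  ("Aqui estão as linhas imediatamente posteriores a essa, ainda não traduzidas:\nb\na\nb",
   "Aqui estão as linhas imediatamente posteriores a essa, ainda não traduzidas:\nb")

-- ===== CLAIM (what is proved, stated in full; the proofs are below) =====
def Claim_unchanged_seleciona_contexto : Prop := ∀ (texto : String) (i : Int) (linhas : List String) (tipo : String), Dom_seleciona_contexto texto i linhas tipo → Pre_seleciona_contexto texto i linhas tipo → Spec_seleciona_contexto texto i linhas tipo (seleciona_contexto texto i linhas tipo)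
def Claim_changed_seleciona_contexto : Prop := Dom_seleciona_contexto (pvDiffWitness_seleciona_contexto.1) (pvDiffWitness_seleciona_contexto.2.1) (pvDiffWitness_seleciona_contexto.2.2.1) (pvDiffWitness_seleciona_contexto.2.2.2) ∧ Pre_seleciona_contexto (pvDiffWitness_seleciona_contexto.1) (pvDiffWitness_seleciona_contexto.2.1) (pvDiffWitness_seleciona_contexto.2.2.1) (pvDiffWitness_seleciona_contexto.2.2.2) ∧ D_seleciona_contexto (pvDiffWitness_seleciona_contexto.1) (pvDiffWitness_seleciona_contexto.2.1) (pvDiffWitness_seleciona_contexto.2.2.1) (pvDiffWitness_seleciona_contexto.2.2.2) ∧ seleciona_contexto (pvDiffWitness_seleciona_contexto.1) (pvDiffWitness_seleciona_contexto.2.1) (pvDiffWitness_seleciona_contexto.2.2.1) (pvDiffWitness_seleciona_contexto.2.2.2) = pvDiffWitnessOut_seleciona_contexto.1 ∧ seleciona_contexto_alt (pvDiffWitness_seleciona_contexto.1) (pvDiffWitness_seleciona_contexto.2.1) (pvDiffWitness_seleciona_contexto.2.2.1) (pvDiffWitness_seleciona_contexto.2.2.2) = pvDiffWitnessOut_seleciona_contexto.2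 ∧ pvDiffWitnessOut_seleciona_contexto.1 ≠ pvDiffWitnessOut_seleciona_contexto.2

def Claim_exact_seleciona_contexto : Prop := ∀ (texto : String) (i : Int) (linhas : List String) (tipo : String), Dom_seleciona_contexto texto i linhas tipo → Pre_seleciona_contexto texto i linhas tipo → D_seleciona_contexto texto i linhas tipo → seleciona_contexto texto i linhas tipo ≠ seleciona_contexto_alt texto i linhas tipo

-- ===== LEMMAS AND PROOFS =====

-- last n elements of a list (what the slice l[-3:] computes)
def pvTakeLast (n : Nat) (l : List String) : List String := l.drop (l.length - n)

theorem pvTakeLast_zero (l : List String) : pvTakeLast 0 l = [] := by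
  simp [pvTakeLast]

theorem pvTakeLast_append_singleton (n : Nat) (hn : 1 ≤ n) (l : List String) (x : String) :
    pvTakeLast n (l ++ [x]) = pvTakeLast (n - 1) l ++ [x] := by
  unfold pvTakeLast
  rw [List.drop_append_of_le_length (by simp; omega)]
  simp
  omega


theorem pvJoin_len_lt : ∀ (fd' : List (List Char)) (a : List Char) (E : List (List Char)), E ≠ [] →
    (PySem.Chars.join ['\n'] (a :: fd')).length < (PySem.Chars.join ['\n'] ((a :: fd') ++ E)).length := by
  intro fd'
  induction fd' with
  | nil =>
    intro a E hE
    cases E with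
    | nil => exact absurd rfl hE
    | cons b E' =>
      rw [PySem.Chars.join_singleton, List.singleton_append, PySem.Chars.join_cons_cons]
      simp
  | cons c fd' ih =>
    intro a E hE
    rw [PySem.Chars.join_cons_cons]
    rw [show ((a :: c :: fd') ++ E) = a :: ((c :: fd') ++ E) by simp]
    rw [show ((c :: fd') ++ E) = c :: (fd' ++ E) by simp, PySem.Chars.join_cons_cons]
    have := ih c E hE
    rw [show (c :: fd') ++ E = c :: (fd' ++ E) by simp] at this
    simp only [List.length_append]
    omega

theorem pvPrevLoop_eq_aux (linhas : List String) : ∀ (n : Nat) (pos : Int), (pos + 1).toNat ≤ n →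
    pos < (linhas.length : Int) → ∀ (count : Nat) (acc : List String), count ≤ 3 →
    pvPrevLoop linhas pos count acc
      = pvTakeLast (3 - count) ((linhas.take (pos + 1).toNat).filter pvNE) ++ acc := by
  intro n
  induction n with
  | zero =>
    intro pos hn hlt count acc hc
    rw [pvPrevLoop]
    rw [if_neg (by omega)]
    have h0 : (pos + 1).toNat = 0 := by omega
    simp [h0, pvTakeLast]
  | succ n ih =>
    intro pos hn hlt count acc hc
    rw [pvPrevLoop]
    by_cases hp : 0 ≤ pos
    · by_cases hcnt : count < 3
      · rw [if_pos ⟨hp, hcnt⟩]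
        have hlen : pos.toNat < linhas.length := by omega
        have hget : PySem.List.pyGet? linhas pos = some (linhas[pos.toNat]) := by
          rw [PySem.List.pyGet?_of_nonneg linhas hp, List.getElem?_eq_getElem hlen]
        rw [hget]
        dsimp only
        have htake : linhas.take (pos + 1).toNat = linhas.take pos.toNat ++ [linhas[pos.toNat]] := by
          have : (pos + 1).toNat = pos.toNat + 1 := by omega
          rw [this, List.take_add_one]
          simp [List.getElem?_eq_getElem hlen]
        have hpos1 : (pos - 1 + 1).toNat = pos.toNat := by omega
        by_cases hne : pvNE (linhas[pos.toNat]) = true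
        · rw [if_pos hne]
          rw [ih (pos - 1) (by omega) (by omega) (count + 1) _ (by omega)]
          rw [htake, List.filter_append, hpos1]
          simp only [List.filter_cons, hne, if_true, List.filter_nil]
          rw [pvTakeLast_append_singleton (3 - count) (by omega)]
          have : 3 - count - 1 = 3 - (count + 1) := by omega
          rw [this]
          simp
        · rw [if_neg hne]
          rw [ih (pos - 1) (by omega) (by omega) count _ (by omega)]
          rw [htake, List.filter_append, hpos1]
          simp only [List.filter_cons, hne, if_true, if_false, List.filter_nil]
          simp
      · rw [if_neg (by omega)]
        have : count = 3 := by omega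
        simp [this, pvTakeLast_zero]
    · rw [if_neg (by omega)]
      have h0 : (pos + 1).toNat = 0 := by omega
      simp [h0, pvTakeLast]

theorem pvPrevLoop_eq (linhas : List String) (pos : Int) (hlt : pos < (linhas.length : Int))
    (count : Nat) (acc : List String) (hc : count ≤ 3) :
    pvPrevLoop linhas pos count acc
      = pvTakeLast (3 - count) ((linhas.take (pos + 1).toNat).filter pvNE) ++ acc :=
  pvPrevLoop_eq_aux linhas (pos + 1).toNat pos le_rfl hlt count acc hc

theorem pvNextLoop_eq_aux (linhas : List String) : ∀ (n : Nat) (pos : Int),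
    ((linhas.length : Int) - pos).toNat ≤ n → 0 ≤ pos → ∀ (count : Nat) (acc : List String),
    pvNextLoop linhas pos count acc
      = acc ++ ((linhas.drop pos.toNat).filter pvNE).take (3 - count) := by
  intro n
  induction n with
  | zero =>
    intro pos hn hp count acc
    rw [pvNextLoop]
    rw [if_neg (by simp [PySem.List.len]; omega)]
    have : linhas.length ≤ pos.toNat := by omega
    simp [List.drop_eq_nil_of_le this]
  | succ n ih =>
    intro pos hn hp count acc
    rw [pvNextLoop]
    by_cases hlt : pos < (linhas.length : Int)
    · by_cases hcnt : count < 3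
      · rw [if_pos ⟨by simpa [PySem.List.len] using hlt, hcnt⟩]
        have hlen : pos.toNat < linhas.length := by omega
        have hget : PySem.List.pyGet? linhas pos = some (linhas[pos.toNat]) := by
          rw [PySem.List.pyGet?_of_nonneg linhas hp, List.getElem?_eq_getElem hlen]
        rw [hget]
        dsimp only
        have hdrop : linhas.drop pos.toNat = linhas[pos.toNat] :: linhas.drop (pos.toNat + 1) :=
          List.drop_eq_getElem_cons hlen
        have hpos1 : (pos + 1).toNat = pos.toNat + 1 := by omega
        by_cases hne : pvNE (linhas[pos.toNat]) = true
        · rw [if_pos hne]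
          rw [ih (pos + 1) (by omega) (by omega) (count + 1)]
          rw [hdrop]
          simp only [List.filter_cons, hne, if_true, if_false, hpos1]
          have h3 : 3 - count = (3 - (count + 1)) + 1 := by omega
          rw [h3, List.take_succ_cons]
          simp
        · rw [if_neg hne]
          rw [ih (pos + 1) (by omega) (by omega) count]
          rw [hdrop]
          simp only [List.filter_cons, hne, if_true, if_false, hpos1]
          simp
      · rw [if_neg (fun h => hcnt h.2)]
        have h30 : 3 - count = 0 := by omega
        simp [h30]
    · rw [if_neg (by simp [PySem.List.len]; omega)]
      have : linhas.length ≤ pos.toNat := by omega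
      simp [List.drop_eq_nil_of_le this]

theorem pvNextLoop_eq (linhas : List String) (pos : Int) (hp : 0 ≤ pos)
    (count : Nat) (acc : List String) :
    pvNextLoop linhas pos count acc
      = acc ++ ((linhas.drop pos.toNat).filter pvNE).take (3 - count) :=
  pvNextLoop_eq_aux linhas ((linhas.length : Int) - pos).toNat pos le_rfl hp count acc

theorem pvNextLoop_neg_eq (linhas : List String) : ∀ (k : Nat), 1 ≤ k → k ≤ linhas.length →
    ∀ (count : Nat) (acc : List String),
    pvNextLoop linhas (-(k : Int)) count acc
      = acc ++ (((linhas.drop (linhas.length - k)) ++ linhas).filter pvNE).take (3 - count) := by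
  intro k
  induction k with
  | zero => intro h; omega
  | succ k ih =>
    intro _ hk count acc
    rw [pvNextLoop]
    by_cases hcnt : count < 3
    · rw [if_pos ⟨by simp [PySem.List.len]; omega, hcnt⟩]
      have hidx : linhas.length - (k + 1) < linhas.length := by omega
      have hget : PySem.List.pyGet? linhas (-(((k + 1 : Nat)) : Int)) = some (linhas[linhas.length - (k + 1)]) := by
        rw [PySem.List.pyGet?_neg_natCast linhas (k + 1) (by omega) hk,
          List.getElem?_eq_getElem hidx]
      rw [hget]
      dsimp only
      have hdrop : linhas.drop (linhas.length - (k + 1))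
          = linhas[linhas.length - (k + 1)] :: linhas.drop (linhas.length - k) := by
        have h1 : linhas.length - (k + 1) + 1 = linhas.length - k := by omega
        rw [List.drop_eq_getElem_cons hidx, h1]
      by_cases hne : pvNE (linhas[linhas.length - (k + 1)]) = true
      · rw [if_pos hne]
        have hnext : (-(((k + 1 : Nat) : Int))) + 1 = -((k : Nat) : Int) := by push_cast; ring
        rw [hnext]
        rcases Nat.eq_zero_or_pos k with hk0 | hk1
        · subst hk0
          rw [show (-((0 : Nat) : Int)) = (0 : Int) by simp]
          rw [pvNextLoop_eq linhas 0 le_rfl]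
          rw [hdrop]
          simp only [List.filter_append, List.filter_cons, hne, if_true, if_false, List.cons_append]
          have h3 : 3 - count = (3 - (count + 1)) + 1 := by omega
          rw [h3, List.take_succ_cons]
          simp [List.drop_eq_nil_of_le (le_refl linhas.length)]
        · rw [ih hk1 (by omega) (count + 1)]
          rw [hdrop]
          simp only [List.filter_append, List.filter_cons, hne, if_true, if_false, List.cons_append]
          have h3 : 3 - count = (3 - (count + 1)) + 1 := by omega
          rw [h3, List.take_succ_cons]
          simp
      · rw [if_neg hne]
        have hnext : (-(((k + 1 : Nat) : Int))) + 1 = -((k : Nat) : Int) := by push_cast; ring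
        rw [hnext]
        rcases Nat.eq_zero_or_pos k with hk0 | hk1
        · subst hk0
          rw [show (-((0 : Nat) : Int)) = (0 : Int) by simp]
          rw [pvNextLoop_eq linhas 0 le_rfl]
          rw [hdrop]
          simp only [List.filter_append, List.filter_cons, hne, if_true, if_false, List.cons_append]
          simp [List.drop_eq_nil_of_le (le_refl linhas.length)]
        · rw [ih hk1 (by omega) count]
          rw [hdrop]
          simp only [List.filter_append, List.filter_cons, hne, if_true, if_false, List.cons_append]
          simp
    · rw [if_neg (fun h => hcnt h.2)]
      have h30 : 3 - count = 0 := by omega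
      simp [h30]

-- ===== VERDICT (by name: the statement is the Claim_ definition above) =====
theorem seleciona_contexto_spec : Claim_unchanged_seleciona_contexto := by
  intro texto i linhas tipo hdom hpre
  unfold Spec_seleciona_contexto
  intro hnd
  unfold Pre_seleciona_contexto at hpre
  unfold D_seleciona_contexto at hnd
  unfold seleciona_contexto seleciona_contexto_alt
  by_cases ht : tipo = "anteriores"
  · have hbt : (tipo == "anteriores") = true := by simp [ht]
    rw [if_pos hbt, if_pos hbt]
    rw [if_pos ht] at hpre
    by_cases h0 : i ≤ 0
    · rw [if_pos h0]
      by_cases hz : i = 0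
      · have hbz : (i == 0) = true := by simp [hz]
        rw [if_pos hbz]
      · have hbz : ¬ ((i == 0) = true) := by simp [hz]
        rw [if_neg hbz]
        rw [pvPrevLoop_eq linhas (i - 1) (by omega) 0 [] (by omega)]
        have h00 : (i - 1 + 1).toNat = 0 := by omega
        rw [h00]
        simp [pvTakeLast]
    · have hbz : ¬ ((i == 0) = true) := by simp; omega
      rw [if_neg hbz, if_neg h0]
      rw [pvPrevLoop_eq linhas (i - 1) (by omega) 0 [] (by omega)]
      rw [PySem.List.slice_to linhas (by omega : (0:Int) ≤ i)]
      rw [PySem.List.slice_from_neg_ofNat _ 3 (by omega)]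
      have h11 : (i - 1 + 1).toNat = i.toNat := by omega
      rw [h11]
      simp [pvTakeLast]
  · have hbt : ¬ ((tipo == "anteriores") = true) := by simp [ht]
    rw [if_neg hbt, if_neg hbt]
    rw [if_neg ht] at hpre
    by_cases hge : i ≥ PySem.List.len linhas - 1
    · rw [if_pos hge, if_pos hge]
    · rw [if_neg hge, if_neg hge]
      simp only [PySem.List.len] at hge hpre
      rw [PySem.List.slice_to _ (by omega : (0:Int) ≤ 3)]
      by_cases hi1 : 0 ≤ i + 1
      · rw [pvNextLoop_eq linhas (i + 1) hi1 0 []]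
        rw [PySem.List.slice_from linhas hi1]
        simp [pvTakeLast]
      · -- wrapped negative start: here ¬ D_ forces agreement
        have hk1 : 1 ≤ (-(i + 1)).toNat := by omega
        have hkl : (-(i + 1)).toNat ≤ linhas.length := by omega
        have hcast : (i + 1) = -(((-(i + 1)).toNat : Nat) : Int) := by omega
        rw [hcast]
        rw [pvNextLoop_neg_eq linhas (-(i + 1)).toNat hk1 hkl 0 []]
        rw [PySem.List.slice_some_none linhas _]
        rw [PySem.List.clampIdx_neg_natCast _ _ (by omega)]
        have hD : ¬ (((linhas.drop ((linhas.length : Int) + (i + 1)).toNat).filter pvNE).length < 3 ∧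
            1 ≤ (linhas.filter pvNE).length) := by
          intro hcon
          exact hnd ⟨ht, by omega, by omega, hcon.1, hcon.2⟩
        have hsame : ((linhas.length : Int) + (i + 1)).toNat = linhas.length - (-(i + 1)).toNat := by
          omega
        rw [hsame] at hD
        rcases not_and_or.mp hD with h3 | h1
        · push_neg at h3
          rw [List.filter_append]
          rw [List.take_append_of_le_length h3]
          simp [pvTakeLast]
        · have hfl : linhas.filter pvNE = [] := by
            have h0 : (linhas.filter pvNE).length = 0 := by omega
            exact List.eq_nil_of_length_eq_zero h0
          have hfd : (linhas.drop (linhas.length - (-(i + 1)).toNat)).filter pvNE = [] := by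
            have hsub : ((linhas.drop (linhas.length - (-(i + 1)).toNat)).filter pvNE).Sublist
                (linhas.filter pvNE) := (List.drop_sublist _ _).filter _
            rw [hfl] at hsub
            exact List.sublist_nil.mp hsub
          rw [List.filter_append, hfl, hfd]
          simp [pvTakeLast]

theorem seleciona_contexto_changed : Claim_changed_seleciona_contexto := by
  unfold Claim_changed_seleciona_contexto
  refine ⟨by decide, by decide, by decide, ?_, by decide, by decide⟩
  show seleciona_contexto "" (-2) ["a", "b"] "posteriores" = _
  unfold seleciona_contexto
  rw [if_neg (by decide), if_neg (by decide)]
  rw [show (-2 + 1 : Int) = -((1 : Nat) : Int) from by norm_num]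
  rw [pvNextLoop_neg_eq ["a", "b"] 1 (by norm_num) (by norm_num) 0 []]
  decide

theorem seleciona_contexto_tight : Claim_exact_seleciona_contexto := by
  intro texto i linhas tipo hdom hpre hd
  obtain ⟨ht, hlb, hub, hk, hT⟩ := hd
  unfold Pre_seleciona_contexto at hpre
  rw [if_neg ht] at hpre
  unfold seleciona_contexto seleciona_contexto_alt
  have hbt : ¬ ((tipo == "anteriores") = true) := by simp [ht]
  rw [if_neg hbt, if_neg hbt]
  have hge : ¬ (i ≥ PySem.List.len linhas - 1) := by simp [PySem.List.len]; omega
  rw [if_neg hge, if_neg hge]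
  have hk1 : 1 ≤ (-(i + 1)).toNat := by omega
  have hkl : (-(i + 1)).toNat ≤ linhas.length := by omega
  have hcast : (i + 1) = -(((-(i + 1)).toNat : Nat) : Int) := by omega
  rw [hcast, pvNextLoop_neg_eq linhas (-(i + 1)).toNat hk1 hkl 0 []]
  rw [PySem.List.slice_to _ (by omega : (0:Int) ≤ 3)]
  rw [PySem.List.slice_some_none linhas _, PySem.List.clampIdx_neg_natCast _ _ (by omega)]
  have hsame : ((linhas.length : Int) + (i + 1)).toNat = linhas.length - (-(i + 1)).toNat := by omega
  rw [hsame] at hk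
  rw [List.filter_append]
  rw [show ((3 : Int).toNat) = 3 from rfl]
  have hLB : List.take 3 ((linhas.drop (linhas.length - (-(i + 1)).toNat)).filter pvNE)
      = (linhas.drop (linhas.length - (-(i + 1)).toNat)).filter pvNE :=
    List.take_of_length_le (by omega)
  have hLA : List.take 3 ((linhas.drop (linhas.length - (-(i + 1)).toNat)).filter pvNE ++ linhas.filter pvNE)
      = (linhas.drop (linhas.length - (-(i + 1)).toNat)).filter pvNE
        ++ List.take (3 - ((linhas.drop (linhas.length - (-(i + 1)).toNat)).filter pvNE).length) (linhas.filter pvNE) := by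
    rw [List.take_append, hLB]
  rw [hLA, hLB]
  set fd := (linhas.drop (linhas.length - (-(i + 1)).toNat)).filter pvNE with hfd
  set E := List.take (3 - fd.length) (linhas.filter pvNE) with hE
  have hEne : E ≠ [] := by
    intro h
    have hlen : E.length = 0 := by rw [h]; rfl
    rw [hE, List.length_take] at hlen
    omega
  simp only [List.nil_append]
  cases hfdc : fd with
  | nil =>
    rw [if_neg (by simpa using hEne), if_pos rfl]
    intro h
    have h2 := congrArg String.toList h
    rw [String.toList_append] at h2
    have h3 := congrArg List.length h2
    rw [List.length_append] at h3
    have hh : ("Aqui estão as linhas imediatamente posteriores a essa, ainda não traduzidas:\n").toList.length = 77 := by decide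
    simp [hh] at h3
  | cons a fd' =>
    rw [if_neg (by simp), if_neg (by simp)]
    intro h
    have h2 := congrArg String.toList h
    rw [String.toList_append, String.toList_append] at h2
    have h3 := List.append_cancel_left h2
    rw [PySem.Str.toList_join, PySem.Str.toList_join] at h3
    have h4 := congrArg List.length h3
    have h5 := pvJoin_len_lt (fd'.map String.toList) a.toList (E.map String.toList)
      (by simpa using hEne)
    have hsep : ("\n" : String).toList = ['\n'] := by decide
    rw [hsep] at h4
    simp only [List.map_append, List.map_cons] at h4 h5
    omega
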